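-- pv_equiv track=rewrite | github.com/strath-ace/smart-dao | sem_analysis/dev/data-collection-sem/plot_func.py | sort_list_my
-- ===== SOURCE A (Python) =====
-- def sort_list_my(input1, input2):
--         # First is the one to sort by
--         # The second is sorted with it
--         temp1 = []
--         temp2 = []
--         while len(input1) > 0:
--             min_value = min(input1)
--             min_index = input1.index(min_value)
--             temp1.append(input1[min_index])
--             temp2.append(input2[min_index])
--             input1.pop(min_index)
--             input2.pop(min_index)
--         return temp1, temp2
-- ===== SOURCE B (Python) =====
-- def sort_list_my(input1, input2):
--     # Stable sort the paired lists by the first list's values in one sorted() call.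
--     # Note: A empties input1/input2 in place; B does not mutate its arguments
--     # (the equivalence claimed is about the return value only).
--     pairs = sorted(zip(input1, input2), key=lambda p: p[0])
--     return [p[0] for p in pairs], [p[1] for p in pairs]
-- ===== Notes on version B (the rewrite author's own statement) =====
-- stated objective: faster
-- what changed: Replaces A's selection-sort loop (repeated min/index/pop on both lists) by one stable sorted() over the zipped pairs followed by an unzip.
import Mathlib
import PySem

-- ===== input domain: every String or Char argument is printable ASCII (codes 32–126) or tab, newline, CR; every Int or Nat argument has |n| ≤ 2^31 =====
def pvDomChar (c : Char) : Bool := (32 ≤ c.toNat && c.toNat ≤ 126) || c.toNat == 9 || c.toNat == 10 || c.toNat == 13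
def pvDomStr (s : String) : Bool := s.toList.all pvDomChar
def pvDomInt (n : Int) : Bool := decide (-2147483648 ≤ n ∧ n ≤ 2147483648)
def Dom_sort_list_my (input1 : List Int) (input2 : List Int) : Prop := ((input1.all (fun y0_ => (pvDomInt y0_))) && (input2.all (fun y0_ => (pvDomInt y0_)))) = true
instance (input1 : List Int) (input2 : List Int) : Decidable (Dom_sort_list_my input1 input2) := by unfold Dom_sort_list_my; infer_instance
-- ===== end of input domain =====

-- B replaces A's selection-sort loop by one stable sort of the zipped pairs plus an unzip
-- (objective: faster, O(n log n) vs O(n^2)); A empties its arguments in place, B does not: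
-- the equivalence proved is about the return value only.


-- ===== PORT A =====
-- selection sort: while input1 nonempty, take min, its first index, move both entries
def sortALoop : Nat → List Int → List Int → List Int → List Int → List Int × List Int
  | 0, _, _, t1, t2 => (t1, t2)
  | f+1, l1, l2, t1, t2 =>
    if l1.length > 0 then
      match PySem.List.min? l1 (fun x => x) with
      | none => (t1, t2)      -- unreachable: l1 is nonempty
      | some m =>
        match PySem.List.index? l1 m with
        | none => (t1, t2)    -- unreachable: m ∈ l1
        | some i =>
          let v1 := PySem.List.pyGetD l1 (i : Int) 0
          let v2 := PySem.List.pyGetD l2 (i : Int) 0   -- Python raises IndexError if i ≥ len input2: excluded by Pre_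
          let l1' := ((PySem.List.pop? l1 (i : Int)).map Prod.snd).getD []
          let l2' := ((PySem.List.pop? l2 (i : Int)).map Prod.snd).getD []
          sortALoop f l1' l2' (t1 ++ [v1]) (t2 ++ [v2])
    else (t1, t2)

def sort_list_my (input1 : List Int) (input2 : List Int) : List Int × List Int :=
  sortALoop input1.length input1 input2 [] []

-- ===== PORT B =====
def sort_list_my_alt (input1 : List Int) (input2 : List Int) : List Int × List Int :=
  let pairs := PySem.List.sorted (input1.zip input2) (fun p => p.1) false
  (pairs.map (fun p => p.1), pairs.map (fun p => p.2))

-- ===== PRECONDITION & SPEC =====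
-- Pre_ excludes inputs with len(input2) < len(input1): A's input2[min_index] access
-- eventually indexes an exhausted list there, so A raises IndexError and returns no value.
def Pre_sort_list_my (input1 : List Int) (input2 : List Int) : Prop :=
  input1.length ≤ input2.length
instance (input1 : List Int) (input2 : List Int) : Decidable (Pre_sort_list_my input1 input2) := by unfold Pre_sort_list_my; infer_instance

def pvWitness_sort_list_my : List Int × List Int := ([3, 1, 2, 1], [10, 20, 30, 40])

def Spec_sort_list_my (input1 : List Int) (input2 : List Int) (out : List Int × List Int) : Prop := out = sort_list_my_alt input1 input2
instance (input1 : List Int) (input2 : List Int) (out : List Int × List Int) : Decidable (Spec_sort_list_my input1 input2 out) := by unfold Spec_sort_list_my; infer_instance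

-- ===== CLAIM (what is proved, stated in full; the proofs are below) =====
def Claim_equal_sort_list_my : Prop := ∀ (input1 : List Int) (input2 : List Int), Dom_sort_list_my input1 input2 → Pre_sort_list_my input1 input2 → Spec_sort_list_my input1 input2 (sort_list_my input1 input2)

-- ===== LEMMAS AND PROOFS =====

-- insertBy puts x in front when x's key is below every key in the target
theorem insertBy_head {α : Type} (key : α → Int) (v : α) (ys : List α)
    (h : ∀ y ∈ ys, key v < key y) :
    PySem.List.insertBy (fun a b => decide (key a < key b)) v ys = v :: ys := by
  cases ys with
  | nil => rfl
  | cons a t => simp [PySem.List.insertBy, h a (List.mem_cons_self)]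

-- a head below everything stays in front of the whole insertion fold
theorem foldl_insertBy_cons {α : Type} (key : α → Int) (v : α) :
    ∀ (t acc : List α), (∀ y ∈ t, ¬ key y < key v) →
    t.foldl (fun acc x => PySem.List.insertBy (fun a b => decide (key a < key b)) x acc) (v :: acc)
      = v :: t.foldl (fun acc x => PySem.List.insertBy (fun a b => decide (key a < key b)) x acc) acc := by
  intro t
  induction t with
  | nil => intro acc _; rfl
  | cons y t ih =>
    intro acc h
    have hy : ¬ key y < key v := h y (List.mem_cons_self)
    have hstep : PySem.List.insertBy (fun a b => decide (key a < key b)) y (v :: acc)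
        = v :: PySem.List.insertBy (fun a b => decide (key a < key b)) y acc := by
      simp [PySem.List.insertBy, hy]
    simp only [List.foldl_cons, hstep]
    exact ih _ (fun z hz => h z (List.mem_cons_of_mem _ hz))

-- the first occurrence of the minimal key leads the stable sort
theorem sorted_first_min {α : Type} (key : α → Int) (pre suf : List α) (v : α)
    (hpre : ∀ y ∈ pre, key v < key y) (hsuf : ∀ y ∈ suf, key v ≤ key y) :
    PySem.List.sorted (pre ++ v :: suf) key false
      = v :: PySem.List.sorted (pre ++ suf) key false := by
  rw [PySem.List.sorted_eq_foldl_insertBy, PySem.List.sorted_eq_foldl_insertBy]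
  rw [List.foldl_append, List.foldl_append, List.foldl_cons]
  have hmem : ∀ y ∈ pre.foldl (fun acc x => PySem.List.insertBy (fun a b => decide (key a < key b)) x acc) [], key v < key y := by
    intro y hy
    apply hpre
    have : y ∈ PySem.List.sorted pre key false := by
      rw [PySem.List.sorted_eq_foldl_insertBy]; exact hy
    exact (PySem.List.mem_sorted _ _ _ _).1 this
  rw [insertBy_head key v _ hmem]
  exact foldl_insertBy_cons key v suf _ (fun y hy => not_lt.2 (hsuf y hy))

-- A's loop accumulates exactly the stably sorted zipped pairs
theorem sortALoop_invariant :
    ∀ (f : Nat) (l1 l2 t1 t2 : List Int), l1.length = f → l1.length ≤ l2.length →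
    sortALoop f l1 l2 t1 t2 =
      (t1 ++ (PySem.List.sorted (l1.zip l2) (fun p => p.1) false).map (fun p => p.1),
       t2 ++ (PySem.List.sorted (l1.zip l2) (fun p => p.1) false).map (fun p => p.2)) := by
  intro f
  induction f with
  | zero =>
    intro l1 l2 t1 t2 hf _
    have : l1 = [] := List.eq_nil_of_length_eq_zero hf
    subst this
    simp [sortALoop, PySem.List.sorted]
  | succ f ih =>
    intro l1 l2 t1 t2 hf hlen
    have hpos : 0 < l1.length := by omega
    have hne : l1 ≠ [] := by
      intro h; subst h; simp at hpos
    obtain ⟨m, hm⟩ : ∃ m, PySem.List.min? l1 (fun x => x) = some m := by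
      cases hmin : PySem.List.min? l1 (fun x => x) with
      | none => exact absurd ((PySem.List.min?_eq_none_iff _ _).1 hmin) hne
      | some m => exact ⟨m, rfl⟩
    have hmmem : m ∈ l1 := PySem.List.min?_mem hm
    have hmin : ∀ y ∈ l1, m ≤ y := PySem.List.min?_isMin hm
    obtain ⟨i, hi⟩ : ∃ i, PySem.List.index? l1 m = some i := by
      cases hidx : PySem.List.index? l1 m with
      | none =>
        have hs := (PySem.List.index?_isSome_iff l1 m).2 hmmem
        rw [hidx] at hs
        exact absurd hs (by simp)
      | some i => exact ⟨i, rfl⟩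
    obtain ⟨pre, suf, hsplit, hplen, hnotin⟩ := (PySem.List.index?_eq_some_iff l1 m i).1 hi
    have hilt : i < l1.length := by
      subst hsplit; rw [← hplen]; simp
    have hilt2 : i < l2.length := lt_of_lt_of_le hilt hlen
    -- decompose l2 at i
    set pre2 := l2.take i with hpre2
    set suf2 := l2.drop (i+1) with hsuf2
    have hl2 : l2 = pre2 ++ l2[i] :: suf2 := by
      rw [hpre2, hsuf2]
      conv_lhs => rw [← List.take_append_drop i l2]
      congr 1
      rw [List.drop_eq_getElem_cons hilt2]
    have hp2len : pre2.length = i := by simp [hpre2]; omega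
    -- unfold one loop step
    have hget1 : PySem.List.pyGetD l1 (i : Int) 0 = m := by
      obtain ⟨hk, hval, _⟩ := PySem.List.getElem_of_index?_eq_some hi
      rw [PySem.List.pyGetD_natCast]
      simp [List.getD, hk, hval]
    have hget2 : PySem.List.pyGetD l2 (i : Int) 0 = l2[i] := by
      rw [PySem.List.pyGetD_natCast]
      simp [List.getD, hilt2]
    have hpop1 : ((PySem.List.pop? l1 (i : Int)).map Prod.snd).getD [] = l1.eraseIdx i := by
      rw [PySem.List.pop?_natCast l1 i hilt]; rfl
    have hpop2 : ((PySem.List.pop? l2 (i : Int)).map Prod.snd).getD [] = l2.eraseIdx i := by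
      rw [PySem.List.pop?_natCast l2 i hilt2]; rfl
    have hstep : sortALoop (f+1) l1 l2 t1 t2
        = sortALoop f (l1.eraseIdx i) (l2.eraseIdx i) (t1 ++ [m]) (t2 ++ [l2[i]]) := by
      simp only [sortALoop, if_pos hpos, hm, hi, hget1, hget2, hpop1, hpop2]
    -- erased lists
    have he1 : l1.eraseIdx i = pre ++ suf := by
      subst hsplit; rw [← hplen]
      exact List.eraseIdx_append_of_length_le (le_refl _) _ |>.trans (by simp)
    have he2 : l2.eraseIdx i = pre2 ++ suf2 := by
      rw [List.eraseIdx_eq_take_drop_succ]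
    have hlen1 : (l1.eraseIdx i).length = f := by
      rw [List.length_eraseIdx_of_lt hilt]; omega
    have hlen12 : (l1.eraseIdx i).length ≤ (l2.eraseIdx i).length := by
      rw [List.length_eraseIdx_of_lt hilt, List.length_eraseIdx_of_lt hilt2]; omega
    -- zip decompositions
    have hzip : l1.zip l2 = pre.zip pre2 ++ (m, l2[i]) :: suf.zip suf2 := by
      conv_lhs => rw [hsplit, hl2]
      rw [List.zip_append (by omega)]
      rfl
    have hzip' : (l1.eraseIdx i).zip (l2.eraseIdx i) = pre.zip pre2 ++ suf.zip suf2 := by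
      rw [he1, he2, List.zip_append (by omega)]
    -- the sorted list decomposes
    have hkey : PySem.List.sorted (l1.zip l2) (fun p => p.1) false
        = (m, l2[i]) :: PySem.List.sorted ((l1.eraseIdx i).zip (l2.eraseIdx i)) (fun p => p.1) false := by
      rw [hzip, hzip']
      apply sorted_first_min
      · intro y hy
        have h1 : y.1 ∈ pre := (List.of_mem_zip hy).1
        have hle : m ≤ y.1 := hmin _ (by rw [hsplit]; exact List.mem_append_left _ h1)
        have hne' : y.1 ≠ m := fun h => hnotin (h ▸ h1)
        exact lt_of_le_of_ne hle (Ne.symm hne')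
      · intro y hy
        exact hmin _ (by rw [hsplit]; exact List.mem_append_right _ (List.mem_cons_of_mem _ (List.of_mem_zip hy).1))
    rw [hstep, ih _ _ _ _ hlen1 hlen12, hkey]
    simp

theorem sortALoop_main (l1 l2 : List Int) (h : l1.length ≤ l2.length) :
    sort_list_my l1 l2 = sort_list_my_alt l1 l2 := by
  unfold sort_list_my sort_list_my_alt
  rw [sortALoop_invariant l1.length l1 l2 [] [] rfl h]
  simp

-- ===== VERDICT (by name: the statement is the Claim_ definition above) =====
theorem sort_list_my_spec : Claim_equal_sort_list_my := by
  intro l1 l2 _ hpre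
  exact sortALoop_main l1 l2 hpre
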